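-- pv_equiv track=rewrite | github.com/Vladimir-Ivanov-92/hunger_games | hunger_games/task_a.py | get_git_project_title
-- ===== SOURCE A (Python) =====
-- def get_git_project_title(links: list[str]) -> str:
--     """
--     Функция принимает в качестве аргумента набор ссылок. Ссылки имеют формат ссылок
--     на проекты на гитхабе. Функция обрабатвает полученные ссылки и возвращает
--     названия самих гит-проектов или сообщение об ошибке, при получении ссылки
--     "вне формата".
--     """
--     error_message = "Ссылка {link} не соотвествует формату:" \
--                     "'https://github.com/имя пользователя/имя проекта' или " \
--                     "'https://github.com/имя пользователя/имя проекта.git'"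
--
--     response_message = "Название проекта: {}"
--
--     response = str()
--
--     for link in links:
--         if not link.startswith("https://github.com/") or len(link.split("/")) != 5:
--             response += error_message.format(link=link) + "\n"
--         else:
--             raw_title = link.split("/")[-1].split(".")
--             if (len(raw_title) == 2 and raw_title[1] == "git") or len(raw_title) == 1:
--                 git_project_title = raw_title[0]
--                 response += response_message.format(git_project_title) + "\n"
--             else:
--                 response += error_message.format(link=link) + "\n"
--     return response
-- ===== SOURCE B (Python) =====
-- def get_git_project_title(links: list[str]) -> str:
--     """
--     Prefix-stripping re-implementation: instead of counting split("/") parts,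
--     strip the fixed prefix, locate the single interior slash with find, and
--     validate the project name by suffix/membership tests instead of split(".").
--     """
--     error_message = "Ссылка {link} не соотвествует формату:" \
--                     "'https://github.com/имя пользователя/имя проекта' или " \
--                     "'https://github.com/имя пользователя/имя проекта.git'"
--     response_message = "Название проекта: {}"
--     prefix = "https://github.com/"
--     lines = []
--     for link in links:
--         line = error_message.format(link=link)
--         if link.startswith(prefix):
--             rest = link[len(prefix):]
--             slash = rest.find("/")
--             if slash != -1:
--                 proj = rest[slash + 1:]
--                 if "/" not in proj:
--                     title = proj[:-4] if proj.endswith(".git") else proj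
--                     if "." not in title:
--                         line = response_message.format(title)
--         lines.append(line)
--     return "".join(l + "\n" for l in lines)
-- ===== Notes on version B (the rewrite author's own statement) =====
-- stated objective: alternative
-- what changed: B validates each link by stripping the fixed 'https://github.com/' prefix, locating the single interior slash with find and checking the project name with an endswith('.git') suffix test plus '.'/'/' membership tests, instead of A's split('/')-part counting and split('.')-pattern matching; lines are collected in a list and joined once instead of repeated string concatenation.
import Mathlib
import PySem

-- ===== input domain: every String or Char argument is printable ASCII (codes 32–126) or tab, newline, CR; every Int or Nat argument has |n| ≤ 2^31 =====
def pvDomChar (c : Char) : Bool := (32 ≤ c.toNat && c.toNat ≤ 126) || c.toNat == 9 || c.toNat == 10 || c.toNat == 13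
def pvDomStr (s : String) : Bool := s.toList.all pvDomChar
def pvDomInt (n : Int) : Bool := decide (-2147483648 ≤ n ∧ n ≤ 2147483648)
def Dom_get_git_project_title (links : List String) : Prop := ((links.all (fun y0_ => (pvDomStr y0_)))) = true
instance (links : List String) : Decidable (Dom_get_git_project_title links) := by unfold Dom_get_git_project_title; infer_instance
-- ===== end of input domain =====

-- B replaces A's split("/")-counting and split(".") pattern test by prefix stripping,
-- a single find("/") and suffix/membership tests (objective: alternative, same cost).

-- ===== PORT A =====
-- the two message templates; str.format is string concatenation here
def pvErr (link : String) : String :=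
  "Ссылка " ++ link ++ " не соотвествует формату:'https://github.com/имя пользователя/имя проекта' или 'https://github.com/имя пользователя/имя проекта.git'"

def pvResp (title : String) : String := "Название проекта: " ++ title

-- s.split(sep) for a non-empty sep (Str.split? is none exactly for sep = "")
def pvSplit (s sep : String) : List String := (PySem.Str.split? s sep).getD []

-- the body of A's 'for link in links' loop: the string appended to response
def pvLineA (link : String) : String :=
  if ¬ PySem.Str.startswith link "https://github.com/" = true ∨ (pvSplit link "/").length ≠ 5 then
    pvErr link ++ "\n"
  else
    -- link.split("/")[-1]: the split list is never empty, so [-1] is its last element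
    let raw_title := pvSplit ((PySem.List.pyGet? (pvSplit link "/") (-1)).getD "") "."
    if (raw_title.length = 2 ∧ (PySem.List.pyGet? raw_title 1).getD "" = "git") ∨ raw_title.length = 1 then
      pvResp ((PySem.List.pyGet? raw_title 0).getD "") ++ "\n"
    else
      pvErr link ++ "\n"

def get_git_project_title (links : List String) : String :=
  links.foldl (fun response link => response ++ pvLineA link) ""

-- ===== PORT B =====
-- the value Source B's loop appends to lines for one link
def pvLineB (link : String) : String :=
  if PySem.Str.startswith link "https://github.com/" = true then
    let rest := PySem.Str.slice link (some 19) none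
    let slash := PySem.Str.find rest "/"
    if slash ≠ -1 then
      let proj := PySem.Str.slice rest (some (slash + 1)) none
      if ¬ PySem.Str.isIn "/" proj = true then
        let title := if PySem.Str.endswith proj ".git" = true then PySem.Str.slice proj none (some (-4)) else proj
        if ¬ PySem.Str.isIn "." title = true then pvResp title else pvErr link
      else pvErr link
    else pvErr link
  else pvErr link

def get_git_project_title_alt (links : List String) : String :=
  let lines := links.foldl (fun acc link => acc ++ [pvLineB link]) []
  PySem.Str.join "" (lines.map (fun l => l ++ "\n"))

-- ===== PRECONDITION & SPEC =====
def Spec_get_git_project_title (links : List String) (out : String) : Prop := out = get_git_project_title_alt links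
instance (links : List String) (out : String) : Decidable (Spec_get_git_project_title links out) := by unfold Spec_get_git_project_title; infer_instance

-- ===== CLAIM (what is proved, stated in full; the proofs are below) =====
def Claim_equal_get_git_project_title : Prop := ∀ (links : List String), Dom_get_git_project_title links → Spec_get_git_project_title links (get_git_project_title links)

-- ===== LEMMAS AND PROOFS =====

-- a direct structural model of Python's str.split with a one-character separator
def pvSp (c : Char) : List Char → List (List Char)
  | [] => [[]]
  | a :: l => if a = c then [] :: pvSp c l else (pvSp c l).modifyHead (fun h => a :: h)

theorem pvSp_ne_nil (c : Char) (l : List Char) : pvSp c l ≠ [] := by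
  cases l with
  | nil => simp [pvSp]
  | cons a l =>
    simp only [pvSp]
    split
    · simp
    · cases h : pvSp c l with
      | nil => exact absurd h (pvSp_ne_nil c l)
      | cons x xs => simp

theorem pvGo_nil (c : Char) (n : Nat) (cur : List Char) (acc : List (List Char)) :
    PySem.Chars.splitOn.go [c] (n+1) [] cur acc = (cur.reverse :: acc).reverse := by
  rw [PySem.Chars.splitOn.go.eq_def]

theorem pvGo_cons (c : Char) (n : Nat) (a : Char) (l cur : List Char) (acc : List (List Char)) :
    PySem.Chars.splitOn.go [c] (n+1) (a :: l) cur acc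
      = if [c].isPrefixOf (a :: l) = true then PySem.Chars.splitOn.go [c] n l [] (cur.reverse :: acc)
        else PySem.Chars.splitOn.go [c] n l (a :: cur) acc := by
  rw [PySem.Chars.splitOn.go.eq_def]; rfl

theorem pvSp_go (c : Char) :
    ∀ (fuel : Nat) (l cur : List Char) (acc : List (List Char)), l.length < fuel →
      PySem.Chars.splitOn.go [c] fuel l cur acc
        = acc.reverse ++ (pvSp c l).modifyHead (fun h => cur.reverse ++ h) := by
  intro fuel
  induction fuel with
  | zero => intro l cur acc h; omega
  | succ n ih =>
    intro l cur acc h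
    cases l with
    | nil => rw [pvGo_nil]; simp [pvSp]
    | cons a l =>
      rw [pvGo_cons]
      have hlt : l.length < n := by simpa using h
      by_cases hac : a = c
      · subst hac
        rw [if_pos (by simp)]
        rw [ih _ _ _ hlt]
        cases hsp : pvSp a l with
        | nil => exact absurd hsp (pvSp_ne_nil a l)
        | cons x xs => simp [pvSp, hsp]
      · rw [if_neg (by simp [Ne.symm hac])]
        rw [ih _ _ _ hlt]
        cases hsp : pvSp c l with
        | nil => exact absurd hsp (pvSp_ne_nil c l)
        | cons x xs => simp [pvSp, hac, hsp]

theorem pvSplitOn_eq (c : Char) (l : List Char) : PySem.Chars.splitOn l [c] = pvSp c l := by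
  have h := pvSp_go c (l.length + 1) l [] [] (by omega)
  cases hsp : pvSp c l with
  | nil => exact absurd hsp (pvSp_ne_nil c l)
  | cons x xs => simpa [PySem.Chars.splitOn, hsp] using h

theorem pvSp_not_mem {c : Char} {l : List Char} (h : c ∉ l) : pvSp c l = [l] := by
  induction l with
  | nil => rfl
  | cons a l ih =>
    simp only [List.mem_cons, not_or] at h
    have ha : ¬ a = c := fun hh => h.1 hh.symm
    simp [pvSp, ha, ih h.2]

theorem pvSp_split {c : Char} {u : List Char} (v : List Char) (h : c ∉ u) :
    pvSp c (u ++ c :: v) = u :: pvSp c v := by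
  induction u with
  | nil => simp [pvSp]
  | cons a u ih =>
    simp only [List.mem_cons, not_or] at h
    have ha : ¬ a = c := fun hh => h.1 hh.symm
    simp [List.cons_append, pvSp, ha, ih h.2, List.modifyHead]

theorem pvSp_length (c : Char) (l : List Char) : (pvSp c l).length = l.count c + 1 := by
  induction l with
  | nil => simp [pvSp]
  | cons a l ih =>
    by_cases h : a = c
    · subst h; simp [pvSp, ih]
    · simp [pvSp, h, List.length_modifyHead, ih]


theorem pvSp_prefix (rest : List Char) :
    pvSp '/' ("https://github.com/".toList ++ rest)
      = "https:".toList :: [] :: "github.com".toList :: pvSp '/' rest := by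
  have h1 : "https://github.com/".toList ++ rest
      = "https:".toList ++ '/' :: ([] ++ '/' :: ("github.com".toList ++ '/' :: rest)) := rfl
  rw [h1, pvSp_split _ (by decide), pvSp_split _ (by decide), pvSp_split _ (by decide)]

-- s.split(sep) for a one-char sep, through the structural model pvSp
theorem pvSplit_eq (s : String) (c : Char) (sep : String) (hsep : sep.toList = [c]) :
    pvSplit s sep = (pvSp c s.toList).map String.ofList := by
  simp [pvSplit, PySem.Str.split?, PySem.Chars.split?, hsep, pvSplitOn_eq]

theorem pv_not_mem_take {l : List Char} {c : Char} {n : Nat}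
    (h : ∀ j < n, ¬ [c] <+: l.drop j) : c ∉ l.take n := by
  intro hmem
  obtain ⟨j, hj, hje⟩ := List.getElem_of_mem hmem
  have h2 : j < min n l.length := by simpa using hj
  refine h j (by omega) ?_
  rw [List.getElem_take] at hje
  rw [List.drop_eq_getElem_cons (by omega : j < l.length), hje]
  exact ⟨_, rfl⟩

theorem pvSlice_neg4 (q t : List Char) (ht : t.length = 4) :
    PySem.List.slice (q ++ t) none (some (-4)) = q := by
  have hlen : (q ++ t).length = q.length + 4 := by simp [ht]
  simp only [PySem.List.slice, PySem.List.clampIdx, hlen]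
  rw [if_pos (by omega : (-4:Int) < 0), if_neg (by push_cast; omega)]
  have h1 : ((q.length + 4 : Int) + -4).toNat = q.length := by omega
  have h2 : (((q.length + 4 : Nat) : Int) + -4).toNat = q.length := by omega
  simp only [h2, List.drop_zero, Nat.sub_zero]
  rw [show List.take q.length (q ++ t) = List.take q.length q ++ List.take (q.length - q.length) t from List.take_append]
  simp

-- per-link agreement: A's loop-body string is B's line plus the newline
theorem pvLine_eq (link : String) : pvLineA link = pvLineB link ++ "\n" := by
  by_cases hs : PySem.Str.startswith link "https://github.com/" = true
  · obtain ⟨rlist, hr⟩ : ∃ r, link.toList = "https://github.com/".toList ++ r := by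
      obtain ⟨t, ht⟩ := (PySem.Chars.startswith_iff link.toList "https://github.com/".toList).mp
        (by simpa using hs)
      exact ⟨t, ht.symm⟩
    have hsplit : pvSplit link "/"
        = "https:" :: "" :: "github.com" :: (pvSp '/' rlist).map String.ofList := by
      rw [pvSplit_eq link '/' "/" rfl, hr, pvSp_prefix]
      simp
    have hrest : (PySem.Str.slice link (some 19) none).toList = rlist := by
      rw [PySem.Str.toList_slice, PySem.Chars.slice_eq_listSlice,
        PySem.List.slice_from link.toList (a := 19) (by norm_num), hr]
      rw [show ((19:Int)).toNat = ("https://github.com/".toList).length from rfl, List.drop_left]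
    have hfind : PySem.Str.find (PySem.Str.slice link (some 19) none) "/"
        = PySem.Chars.find rlist ['/'] := by
      rw [PySem.Str.find_eq, hrest]; rfl
    simp only [pvLineA, pvLineB]
    by_cases hf : PySem.Chars.find rlist ['/'] = -1
    · -- no slash after the prefix: both sides give the error line
      have hnm : '/' ∉ rlist := by
        have := (PySem.Chars.find_eq_neg_one_iff rlist ['/']).mp hf
        exact fun hm => this ((List.singleton_infix_iff _ _).mpr hm)
      have hlen : (pvSplit link "/").length = 4 := by
        rw [hsplit, pvSp_not_mem hnm]; rfl
      rw [if_pos (Or.inr (by omega)), if_pos hs, hfind, if_neg (fun hc => hc hf)]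
    · -- there is a slash; split rlist at its first occurrence
      have hge : 0 ≤ PySem.Chars.find rlist ['/'] := by
        have := PySem.Chars.neg_one_le_find rlist ['/']
        omega
      obtain ⟨hpre, hmin⟩ := PySem.Chars.find_spec hge
      set i : Nat := (PySem.Chars.find rlist ['/']).toNat with hi
      set u : List Char := rlist.take i with hu
      set p : List Char := rlist.drop (i+1) with hp
      have hdrop : rlist.drop i = '/' :: p := by
        obtain ⟨t, ht⟩ := hpre
        have h1 : List.drop 1 (List.drop i rlist) = p := by rw [List.drop_drop, hp]
        rw [← ht] at h1 ⊢
        simp only [List.singleton_append, List.drop_succ_cons, List.drop_zero] at h1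
        rw [h1]
        rfl
      have hdecomp : rlist = u ++ '/' :: p := by
        conv_lhs => rw [← List.take_append_drop i rlist]
        rw [hdrop]
      have hnu : '/' ∉ u := pv_not_mem_take hmin
      have hproj : (PySem.Str.slice (PySem.Str.slice link (some 19) none)
          (some (PySem.Chars.find rlist ['/'] + 1)) none).toList = p := by
        rw [PySem.Str.toList_slice, PySem.Chars.slice_eq_listSlice, hrest,
          PySem.List.slice_from rlist (a := PySem.Chars.find rlist ['/'] + 1) (by omega)]
        rw [show (PySem.Chars.find rlist ['/'] + 1).toNat = i + 1 by omega, hp]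
      have hcount : rlist.count '/' = 1 + p.count '/' := by
        rw [hdecomp, List.count_append, List.count_cons]
        rw [List.count_eq_zero.mpr hnu]
        simp
        omega
      rw [if_pos hs, hfind, if_pos (fun hc => hf hc)]
      by_cases hip : '/' ∈ p
      · -- a second slash: error on both sides
        have hlen : (pvSplit link "/").length ≠ 5 := by
          rw [hsplit]
          simp only [List.length_cons, List.length_map, pvSp_length, hcount]
          have : 1 ≤ p.count '/' := List.count_pos_iff.mpr hip
          omega
        have hisin : ¬ ¬ PySem.Str.isIn "/" (PySem.Str.slice (PySem.Str.slice link (some 19) none)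
            (some (PySem.Chars.find rlist ['/'] + 1)) none) = true := by
          rw [PySem.Str.isIn_eq, hproj, PySem.Chars.isIn_iff_infix]
          simp [List.singleton_infix_iff, hip]
        rw [if_pos (Or.inr hlen), if_neg hisin]
      · -- exactly one slash: compare the title logic
        have hcp : p.count '/' = 0 := List.count_eq_zero.mpr hip
        have hsp2 : pvSp '/' rlist = [u, p] := by
          rw [hdecomp, pvSp_split _ hnu, pvSp_not_mem hip]
        have hsplit5 : pvSplit link "/"
            = ["https:", "", "github.com", String.ofList u, String.ofList p] := by
          rw [hsplit, hsp2]; rfl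
        have hlen5 : (pvSplit link "/").length = 5 := by rw [hsplit5]; rfl
        have hraw : pvSplit ((PySem.List.pyGet? (pvSplit link "/") (-1)).getD "") "."
            = (pvSp '.' p).map String.ofList := by
          rw [hsplit5]
          rw [show (PySem.List.pyGet? ["https:", "", "github.com", String.ofList u, String.ofList p] (-1)).getD ""
              = String.ofList p from rfl]
          rw [pvSplit_eq _ '.' "." rfl, String.toList_ofList]
        have hnoslash : ¬ PySem.Str.isIn "/" (PySem.Str.slice (PySem.Str.slice link (some 19) none)
            (some (PySem.Chars.find rlist ['/'] + 1)) none) = true := by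
          rw [PySem.Str.isIn_eq, hproj, PySem.Chars.isIn_iff_infix]
          simp [List.singleton_infix_iff, hip]
        rw [if_neg (by rintro (h | h) <;> [exact h hs; exact h hlen5]), hraw, if_pos hnoslash]
        by_cases hgit : PySem.Str.endswith (PySem.Str.slice (PySem.Str.slice link (some 19) none)
            (some (PySem.Chars.find rlist ['/'] + 1)) none) ".git" = true
        · -- project name ends in ".git"
          obtain ⟨q, hq⟩ : ∃ q, q ++ ".git".toList = p := by
            obtain ⟨q, hq⟩ := (PySem.Chars.endswith_iff _ _).mp (by
              rw [PySem.Str.endswith_eq, hproj] at hgit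
              exact hgit)
            exact ⟨q, hq⟩
          have htitle : (PySem.Str.slice (PySem.Str.slice (PySem.Str.slice link (some 19) none)
              (some (PySem.Chars.find rlist ['/'] + 1)) none) none (some (-4))).toList = q := by
            rw [PySem.Str.toList_slice, PySem.Chars.slice_eq_listSlice, hproj, ← hq,
              pvSlice_neg4 q _ (by rfl)]
          rw [if_pos hgit]
          have hgitlist : '.' :: "git".toList = ".git".toList := rfl
          have hsplitp : pvSp '.' p = pvSp '.' (q ++ '.' :: "git".toList) := by
            rw [hgitlist, hq]
          have hcnt : p.count '.' = q.count '.' + 1 := by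
            rw [← hq, List.count_append]
            rfl
          by_cases hdq : '.' ∈ q
          · -- a dot before ".git": invalid on both sides
            have hisdot : ¬ ¬ PySem.Str.isIn "." (PySem.Str.slice (PySem.Str.slice (PySem.Str.slice link (some 19) none)
                (some (PySem.Chars.find rlist ['/'] + 1)) none) none (some (-4))) = true := by
              rw [PySem.Str.isIn_eq, htitle, PySem.Chars.isIn_iff_infix]
              simp [List.singleton_infix_iff, hdq]
            have hAraw : ¬ (((pvSp '.' p).map String.ofList).length = 2 ∧
                (PySem.List.pyGet? ((pvSp '.' p).map String.ofList) 1).getD "" = "git" ∨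
                ((pvSp '.' p).map String.ofList).length = 1) := by
              simp only [List.length_map, pvSp_length, hcnt]
              have : 1 ≤ q.count '.' := List.count_pos_iff.mpr hdq
              rintro (⟨h2, _⟩ | h1) <;> omega
            rw [if_neg hisdot, if_neg hAraw]
          · -- valid name: A's title raw_title[0], B's title the sliced prefix
            have hsp : pvSp '.' p = [q, "git".toList] := by
              rw [hsplitp, pvSp_split _ hdq, pvSp_not_mem (by decide)]
            have hisdot : ¬ PySem.Str.isIn "." (PySem.Str.slice (PySem.Str.slice (PySem.Str.slice link (some 19) none)
                (some (PySem.Chars.find rlist ['/'] + 1)) none) none (some (-4))) = true := by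
              rw [PySem.Str.isIn_eq, htitle, PySem.Chars.isIn_iff_infix]
              simp [List.singleton_infix_iff, hdq]
            rw [hsp, if_pos hisdot]
            have hget1 : (PySem.List.pyGet? ([q, "git".toList].map String.ofList) 1).getD "" = "git" := by
              rw [show (PySem.List.pyGet? ([q, "git".toList].map String.ofList) 1).getD ""
                  = String.ofList "git".toList from rfl]
              rw [String.ofList_toList]
            rw [if_pos (Or.inl ⟨rfl, hget1⟩)]
            have heq : (PySem.List.pyGet? ([q, "git".toList].map String.ofList) 0).getD ""
                = PySem.Str.slice (PySem.Str.slice (PySem.Str.slice link (some 19) none)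
                  (some (PySem.Chars.find rlist ['/'] + 1)) none) none (some (-4)) := by
              rw [show (PySem.List.pyGet? ([q, "git".toList].map String.ofList) 0).getD ""
                  = String.ofList q from rfl]
              apply String.toList_inj.mp
              rw [String.toList_ofList, htitle]
            rw [heq]
        · -- project name does not end in ".git"
          rw [if_neg hgit]
          have hnosuf : ¬ ".git".toList <:+ p := by
            intro hsuf
            exact hgit (by rw [PySem.Str.endswith_eq, hproj]; exact (PySem.Chars.endswith_iff _ _).mpr hsuf)
          by_cases hdp : '.' ∈ p
          · -- dots but no ".git" suffix: invalid on both sides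
            have hisdot : ¬ ¬ PySem.Str.isIn "." (PySem.Str.slice (PySem.Str.slice link (some 19) none)
                (some (PySem.Chars.find rlist ['/'] + 1)) none) = true := by
              rw [PySem.Str.isIn_eq, hproj, PySem.Chars.isIn_iff_infix]
              simp [List.singleton_infix_iff, hdp]
            have hAraw : ¬ (((pvSp '.' p).map String.ofList).length = 2 ∧
                (PySem.List.pyGet? ((pvSp '.' p).map String.ofList) 1).getD "" = "git" ∨
                ((pvSp '.' p).map String.ofList).length = 1) := by
              rintro (⟨h2, hgitel⟩ | h1)
              · -- length 2 with second piece "git" would force the ".git" suffix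
                obtain ⟨u', v, huv, hnu'⟩ := List.eq_append_cons_of_mem hdp
                have hc2 : p.count '.' = 1 := by
                  have hlp := pvSp_length '.' p
                  rw [List.length_map] at h2
                  omega
                have hcv : v.count '.' = 0 := by
                  rw [huv, List.count_append, List.count_cons] at hc2
                  rw [List.count_eq_zero.mpr hnu'] at hc2
                  simp at hc2
                  omega
                have hspv : pvSp '.' p = [u', v] := by
                  rw [huv, pvSp_split _ hnu', pvSp_not_mem (List.count_eq_zero.mp hcv)]
                rw [hspv] at hgitel
                have hv : v = "git".toList := by
                  have h1 : String.ofList v = "git" := by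
                    rw [show (PySem.List.pyGet? ([u', v].map String.ofList) 1).getD ""
                        = String.ofList v from rfl] at hgitel
                    exact hgitel
                  have h2 := congrArg String.toList h1
                  rwa [String.toList_ofList] at h2
                apply hnosuf
                rw [huv, hv]
                exact ⟨u', rfl⟩
              · rw [List.length_map, pvSp_length] at h1
                have : p.count '.' = 0 := by omega
                exact (List.count_eq_zero.mp this) hdp
            rw [if_neg hisdot, if_neg hAraw]
          · -- no dot at all: both return the project name itself
            have hsp : pvSp '.' p = [p] := pvSp_not_mem hdp
            have hisdot : ¬ PySem.Str.isIn "." (PySem.Str.slice (PySem.Str.slice link (some 19) none)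
                (some (PySem.Chars.find rlist ['/'] + 1)) none) = true := by
              rw [PySem.Str.isIn_eq, hproj, PySem.Chars.isIn_iff_infix]
              simp [List.singleton_infix_iff, hdp]
            rw [hsp, if_pos hisdot, if_pos (Or.inr (by simp : (List.map String.ofList [p]).length = 1))]
            have heq : (PySem.List.pyGet? ([p].map String.ofList) 0).getD ""
                = PySem.Str.slice (PySem.Str.slice link (some 19) none)
                  (some (PySem.Chars.find rlist ['/'] + 1)) none := by
              rw [show (PySem.List.pyGet? ([p].map String.ofList) 0).getD ""
                  = String.ofList p from rfl]
              apply String.toList_inj.mp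
              rw [String.toList_ofList, hproj]
            rw [heq]
  · simp only [pvLineA, pvLineB]
    rw [if_pos (Or.inl hs), if_neg hs]

theorem pvJoin_cons (x : String) (rest : List String) :
    PySem.Str.join "" (x :: rest) = x ++ PySem.Str.join "" rest := by
  apply String.toList_inj.mp
  cases rest with
  | nil => simp [PySem.Str.toList_join, PySem.Chars.join_singleton, PySem.Chars.join_nil]
  | cons y ys =>
    simp [PySem.Str.toList_join, PySem.Chars.join_cons_cons]

theorem pvFold_eq (ls : List String) : ∀ (r : String),
    ls.foldl (fun response link => response ++ pvLineA link) r
      = r ++ PySem.Str.join "" (ls.map (fun l => pvLineB l ++ "\n")) := by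
  induction ls with
  | nil =>
    intro r
    rw [List.map_nil, show PySem.Str.join "" [] = "" from rfl, String.append_empty, List.foldl_nil]
  | cons a ls ih =>
    intro r
    rw [List.foldl_cons, ih, List.map_cons, pvJoin_cons, pvLine_eq, String.append_assoc]

-- ===== VERDICT (by name: the statement is the Claim_ definition above) =====
theorem get_git_project_title_spec : Claim_equal_get_git_project_title := by
  intro links _
  unfold Spec_get_git_project_title get_git_project_title get_git_project_title_alt
  rw [pvFold_eq, String.empty_append, PySem.List.foldl_append_singleton_eq_map]
  simp [List.map_map, Function.comp_def]
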